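-- pv_equiv track=rewrite | github.com/LoganKloft/aoc2023 | day_7_camel_cards/part1.py | isFourOfKind
-- ===== SOURCE A (Python) =====
-- def isFourOfKind(cards):
--     seen = dict()
--     for card in cards:
--         if card not in seen:
--             seen[card] = 0
--         seen[card] += 1
--
--     for key, val in seen.items():
--         if val == 4: return 1
--     return 0
-- ===== SOURCE B (Python) =====
-- def isFourOfKind(cards):
--     run = 0
--     prev = None
--     for c in sorted(cards):
--         if run > 0 and c == prev:
--             run += 1
--         else:
--             if run == 4:
--                 return 1
--             prev = c
--             run = 1
--     return 1 if run == 4 else 0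
-- ===== Notes on version B (the rewrite author's own statement) =====
-- stated objective: alternative
-- what changed: B replaces A's frequency-dictionary build plus items scan with a sort-then-scan: it sorts the cards and walks the sorted list once tracking the current run length, returning 1 exactly when some run has length 4.
import Mathlib
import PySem

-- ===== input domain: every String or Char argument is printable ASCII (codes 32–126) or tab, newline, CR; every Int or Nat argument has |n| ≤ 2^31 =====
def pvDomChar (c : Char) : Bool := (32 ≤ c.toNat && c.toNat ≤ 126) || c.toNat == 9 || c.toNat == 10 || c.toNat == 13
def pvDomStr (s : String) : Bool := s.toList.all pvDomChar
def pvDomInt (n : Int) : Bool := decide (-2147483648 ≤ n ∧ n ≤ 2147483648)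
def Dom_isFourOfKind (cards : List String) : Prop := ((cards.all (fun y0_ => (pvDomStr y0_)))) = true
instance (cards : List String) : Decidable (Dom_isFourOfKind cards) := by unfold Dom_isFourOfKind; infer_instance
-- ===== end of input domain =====

-- B changes A's frequency-dictionary build into a sort-then-scan over run lengths (alternative decomposition, same result).
-- ===== PORT A =====
def scanItemsA : List (String × Int) → Int
  | [] => 0
  | (_, v) :: rest => if v = 4 then 1 else scanItemsA rest

def isFourOfKind (cards : List String) : Int :=
  let seen := cards.foldl (fun seen card =>
    let seen := if seen.contains card then seen else seen.insert card 0
    seen.insert card (seen.getD card 0 + 1)) PySem.Dict.empty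
  scanItemsA seen.items

-- ===== PORT B =====
def altLoop : List String → Option String → Int → Int
  | [], _, run => if run = 4 then 1 else 0
  | c :: rest, prev, run =>
      if run > 0 ∧ prev = some c then altLoop rest prev (run + 1)
      else if run = 4 then 1 else altLoop rest (some c) 1

def isFourOfKind_alt (cards : List String) : Int :=
  altLoop (PySem.List.sorted cards (fun x => x) false) none 0

-- ===== PRECONDITION & SPEC =====
def Spec_isFourOfKind (cards : List String) (out : Int) : Prop := out = isFourOfKind_alt cards
instance (cards : List String) (out : Int) : Decidable (Spec_isFourOfKind cards out) := by unfold Spec_isFourOfKind; infer_instance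

-- ===== CLAIM (what is proved, stated in full; the proofs are below) =====
def Claim_equal_isFourOfKind : Prop := ∀ (cards : List String), Dom_isFourOfKind cards → Spec_isFourOfKind cards (isFourOfKind cards)

-- ===== LEMMAS AND PROOFS =====

-- A's loop body equals the standard counter step
theorem stepA_eq (d : PySem.Dict String Int) (card : String) :
    (let d1 := if d.contains card then d else d.insert card 0
     d1.insert card (d1.getD card 0 + 1)) = d.insert card (d.getD card 0 + 1) := by
  by_cases h : d.contains card = true
  · simp [h]
  · simp only [Bool.not_eq_true] at h
    simp [h, PySem.Dict.getD_insert_self, PySem.Dict.insert_insert_self,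
      PySem.Dict.getD_of_not_contains d 0 h]

theorem foldA_eq_counter (cards : List String) :
    cards.foldl (fun seen card =>
      let seen := if seen.contains card then seen else seen.insert card 0
      seen.insert card (seen.getD card 0 + 1)) PySem.Dict.empty
    = PySem.Dict.counter cards := by
  rw [← PySem.Dict.foldl_insert_getD_add_one_eq_counter]
  exact PySem.List.foldl_congr_mem _ _ _ _ (fun d c _ => stepA_eq d c)

theorem scanItemsA_eq (l : List (String × Int)) :
    scanItemsA l = if ∃ p ∈ l, p.2 = 4 then 1 else 0 := by
  induction l with
  | nil => simp [scanItemsA]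
  | cons p rest ih =>
    obtain ⟨k, v⟩ := p
    by_cases h : v = (4 : Int)
    · simp [scanItemsA, h]
    · rw [show scanItemsA ((k, v) :: rest) = scanItemsA rest by
        simp [scanItemsA, h], ih]
      refine if_congr ?_ rfl rfl
      constructor
      · rintro ⟨q, hq, h4⟩; exact ⟨q, List.mem_cons_of_mem _ hq, h4⟩
      · rintro ⟨q, hq, h4⟩
        rcases List.mem_cons.mp hq with rfl | hq
        · exact absurd h4 h
        · exact ⟨q, hq, h4⟩

theorem isFourOfKind_char (cards : List String) :
    isFourOfKind cards = if ∃ c ∈ cards, cards.count c = 4 then 1 else 0 := by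
  show scanItemsA _ = _
  rw [foldA_eq_counter, scanItemsA_eq, PySem.Dict.items_counter]
  refine if_congr ?_ rfl rfl
  constructor
  · rintro ⟨p, hp, h4⟩
    simp only [List.mem_map] at hp
    obtain ⟨k, hk, rfl⟩ := hp
    rw [PySem.Set.mem_ofList] at hk
    exact ⟨k, hk, by exact_mod_cast (show ((cards.count k : Int)) = 4 from h4)⟩
  · rintro ⟨c, hc, h4⟩
    refine ⟨(c, (cards.count c : Int)), ?_, show ((cards.count c : Int)) = 4 by exact_mod_cast h4⟩
    exact List.mem_map.mpr ⟨c, (PySem.Set.mem_ofList cards c).mpr hc, rfl⟩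

-- B's scan on a sorted tail: run is the number of copies of cur already consumed
theorem altLoop_char (l : List String) (cur : String) (run : Int)
    (hs : l.Pairwise (· ≤ ·)) (hrun : 1 ≤ run) (hle : ∀ y ∈ l, cur ≤ y) :
    altLoop l (some cur) run
      = if run + (l.count cur : Int) = 4 ∨ ∃ c ∈ l, c ≠ cur ∧ l.count c = 4 then 1 else 0 := by
  induction l generalizing cur run with
  | nil =>
    simp only [altLoop, List.count_nil, List.not_mem_nil]
    refine if_congr ?_ rfl rfl
    constructor
    · intro h; left; omega
    · rintro (h | ⟨c, hc, _⟩)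
      · omega
      · exact absurd hc (by simp)
  | cons x rest ih =>
    rcases List.pairwise_cons.mp hs with ⟨hx, hrest⟩
    by_cases hxc : cur = x
    · subst hxc
      have hpos : run > 0 := by omega
      have hstep : altLoop (cur :: rest) (some cur) run = altLoop rest (some cur) (run + 1) := by
        simp [altLoop, hpos]
      rw [hstep, ih cur (run + 1) hrest (by omega) hx]
      refine if_congr ?_ rfl rfl
      constructor
      · rintro (h | ⟨c, hc, hne, h4⟩)
        · left; rw [List.count_cons_self]; push_cast; omega
        · right; exact ⟨c, List.mem_cons_of_mem _ hc, hne,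
            by rw [List.count_cons_of_ne hne.symm]; exact h4⟩
      · rintro (h | ⟨c, hc, hne, h4⟩)
        · left; rw [List.count_cons_self] at h; push_cast at h; omega
        · rcases List.mem_cons.mp hc with rfl | hc
          · exact absurd rfl hne
          · right; exact ⟨c, hc, hne, by rwa [List.count_cons_of_ne hne.symm] at h4⟩
    · -- cur < x, so cur does not occur in x :: rest
      have hcx : cur < x := lt_of_le_of_ne (hle x List.mem_cons_self) hxc
      have hnotin : cur ∉ x :: rest := by
        intro hmem
        rcases List.mem_cons.mp hmem with rfl | hmem
        · exact absurd rfl hxc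
        · exact absurd (hx cur hmem) (not_le_of_gt hcx)
      have hcount0 : (x :: rest).count cur = 0 := List.count_eq_zero.mpr hnotin
      have hstep : altLoop (x :: rest) (some cur) run
          = if run = 4 then 1 else altLoop rest (some x) 1 := by
        simp only [altLoop]
        rw [if_neg]
        rintro ⟨-, h2⟩
        exact hxc (Option.some.inj h2)
      rw [hstep]
      by_cases h4 : run = (4 : Int)
      · rw [if_pos h4, if_pos]
        left; rw [hcount0]; push_cast; omega
      · rw [if_neg h4, ih x 1 hrest le_rfl hx]
        refine if_congr ?_ rfl rfl
        constructor
        · rintro (h | ⟨c, hc, hne, hcc⟩)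
          · refine Or.inr ⟨x, List.mem_cons_self, fun he => hxc he.symm, ?_⟩
            rw [List.count_cons_self]; omega
          · have hnecur : c ≠ cur := fun he =>
              hnotin (he ▸ List.mem_cons_of_mem _ hc)
            by_cases hcx2 : c = x
            · subst hcx2
              refine Or.inr ⟨c, List.mem_cons_self, hnecur, ?_⟩
              rw [List.count_cons_self]
              rw [List.count_eq_zero.mpr (fun hmem => hne rfl)] at hcc
              omega
            · exact Or.inr ⟨c, List.mem_cons_of_mem _ hc, hnecur,
                by rw [List.count_cons_of_ne (fun he => hcx2 he.symm)]; exact hcc⟩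
        · rintro (h | ⟨c, hc, hne, hcc⟩)
          · rw [hcount0] at h; push_cast at h; omega
          · by_cases hcx2 : c = x
            · subst hcx2
              left
              rw [List.count_cons_self] at hcc
              omega
            · rcases List.mem_cons.mp hc with rfl | hc
              · exact absurd rfl hcx2
              · exact Or.inr ⟨c, hc, hcx2, by rwa [List.count_cons_of_ne (fun he => hcx2 he.symm)] at hcc⟩

theorem isFourOfKind_alt_char (cards : List String) :
    isFourOfKind_alt cards = if ∃ c ∈ cards, cards.count c = 4 then 1 else 0 := by
  unfold isFourOfKind_alt
  have hperm : (PySem.List.sorted cards (fun x => x) false).Perm cards :=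
    PySem.List.sorted_perm cards (fun x => x) false
  have hpw : (PySem.List.sorted cards (fun x => x) false).Pairwise (· ≤ ·) :=
    PySem.List.sorted_pairwise cards (fun x => x)
  have hcond : (∃ c ∈ PySem.List.sorted cards (fun x => x) false,
        (PySem.List.sorted cards (fun x => x) false).count c = 4)
      ↔ ∃ c ∈ cards, cards.count c = 4 := by
    constructor
    · rintro ⟨c, hc, h4⟩
      exact ⟨c, hperm.mem_iff.mp hc, by rw [← hperm.count_eq]; exact h4⟩
    · rintro ⟨c, hc, h4⟩
      exact ⟨c, hperm.mem_iff.mpr hc, by rw [hperm.count_eq]; exact h4⟩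
  rcases hl : PySem.List.sorted cards (fun x => x) false with _ | ⟨x, rest⟩
  · rw [hl] at hcond
    rw [show altLoop [] none 0 = (0 : Int) by simp [altLoop], if_neg]
    rw [← hcond]
    simp
  · rw [hl] at hcond hpw
    rcases List.pairwise_cons.mp hpw with ⟨hx, hrest⟩
    have h0 : altLoop (x :: rest) none 0 = altLoop rest (some x) 1 := by
      simp [altLoop]
    rw [h0, altLoop_char rest x 1 hrest le_rfl hx]
    refine if_congr (Iff.trans ?_ hcond) rfl rfl
    constructor
    · rintro (h | ⟨c, hc, hne, h4⟩)
      · exact ⟨x, List.mem_cons_self, by rw [List.count_cons_self]; omega⟩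
      · exact ⟨c, List.mem_cons_of_mem _ hc, by rwa [List.count_cons_of_ne hne.symm]⟩
    · rintro ⟨c, hc, h4⟩
      by_cases hcx : c = x
      · subst hcx
        left; rw [List.count_cons_self] at h4; omega
      · rcases List.mem_cons.mp hc with rfl | hc
        · exact absurd rfl hcx
        · exact Or.inr ⟨c, hc, hcx, by rwa [List.count_cons_of_ne (fun he => hcx he.symm)] at h4⟩

-- ===== VERDICT (by name: the statement is the Claim_ definition above) =====
theorem isFourOfKind_spec : Claim_equal_isFourOfKind := by
  intro cards _
  unfold Spec_isFourOfKind
  rw [isFourOfKind_char, isFourOfKind_alt_char]
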